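-- pv_equiv track=rewrite | github.com/Jao42/suap-scraper | calculos.py | mensagemQuantoFalta
-- ===== SOURCE A (Python) =====
-- def mensagemQuantoFalta(quanto_falta):
--   msg = ''
--   passou = 0
--   for mat, falta in quanto_falta.items():
--     msg += mat + ':\n'
--     if falta < 0:
--       msg += 'jah passou\n\n'
--       passou += 1
--       continue
--     msg += f'faltam {falta} pontos nah media pro c passar\n\n'
--   if passou:
--     msg += f'Você já passou em {passou}/{len(quanto_falta)} materias(genio, apenas.)\n'
--   return msg
-- ===== SOURCE B (Python) =====
-- def mensagemQuantoFalta(quanto_falta):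
--   # divide-and-conquer: recursively build (message, passed-count) for halves and merge
--   items = list(quanto_falta.items())
--   def rec(lo, hi):
--     if hi - lo == 0:
--       return ('', 0)
--     if hi - lo == 1:
--       mat, falta = items[lo]
--       if falta < 0:
--         return (mat + ':\njah passou\n\n', 1)
--       return (mat + f':\nfaltam {falta} pontos nah media pro c passar\n\n', 0)
--     mid = (lo + hi) // 2
--     ltext, lcnt = rec(lo, mid)
--     rtext, rcnt = rec(mid, hi)
--     return (ltext + rtext, lcnt + rcnt)
--   body, passou = rec(0, len(items))
--   if passou:
--     body += f'Você já passou em {passou}/{len(items)} materias(genio, apenas.)\n'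
--   return body
-- ===== Notes on version B (the rewrite author's own statement) =====
-- stated objective: alternative
-- what changed: Replaces the single left-to-right accumulate-and-count loop with a divide-and-conquer recursion over index ranges that builds (message, passed-count) for each half and merges them, appending the summary once at the end.
import Mathlib
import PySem

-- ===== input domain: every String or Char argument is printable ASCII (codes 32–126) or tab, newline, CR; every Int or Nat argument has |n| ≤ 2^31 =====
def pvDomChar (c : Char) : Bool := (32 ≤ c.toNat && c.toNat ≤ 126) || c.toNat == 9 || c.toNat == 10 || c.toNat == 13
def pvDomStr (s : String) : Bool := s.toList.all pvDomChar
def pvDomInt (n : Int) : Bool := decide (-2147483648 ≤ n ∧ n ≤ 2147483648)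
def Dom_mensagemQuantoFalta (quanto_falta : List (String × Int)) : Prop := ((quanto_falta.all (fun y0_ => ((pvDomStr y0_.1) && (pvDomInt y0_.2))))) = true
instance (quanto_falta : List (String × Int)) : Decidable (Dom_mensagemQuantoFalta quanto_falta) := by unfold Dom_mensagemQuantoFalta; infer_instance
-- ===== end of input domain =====

-- B replaces A's single accumulate-and-count loop by a divide-and-conquer recursion over
-- index ranges merging (message, passed-count) pairs; objective: alternative decomposition.

-- ===== PORT A =====
-- literal port of A: one fold carrying (msg, passou), then the conditional summary line
def mensagemQuantoFalta (quanto_falta : List (String × Int)) : String :=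
  let st := quanto_falta.foldl (fun (st : String × Int) (p : String × Int) =>
    let msg := st.1 ++ p.1 ++ ":\n"
    if p.2 < 0 then (msg ++ "jah passou\n\n", st.2 + 1)
    else (msg ++ "faltam " ++ PySem.Int.toStr p.2 ++ " pontos nah media pro c passar\n\n", st.2))
    ("", 0)
  if st.2 ≠ 0 then
    st.1 ++ "Você já passou em " ++ PySem.Int.toStr st.2 ++ "/" ++
      PySem.Int.toStr (quanto_falta.length : Int) ++ " materias(genio, apenas.)\n"
  else st.1

-- ===== PORT B =====
-- port of B's rec(lo, hi): divide and conquer on the index range [lo, hi)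
def pvDC (items : List (String × Int)) (lo hi : Nat) : String × Int :=
  if hi - lo = 0 then ("", 0)
  else if hi - lo = 1 then
    match PySem.List.pyGet? items (lo : Int) with
    | none => ("", 0)   -- unreachable: rec is only called with lo < hi ≤ len(items)
    | some p =>
      if p.2 < 0 then (p.1 ++ ":\njah passou\n\n", 1)
      else (p.1 ++ ":\nfaltam " ++ PySem.Int.toStr p.2 ++ " pontos nah media pro c passar\n\n", 0)
  else
    ((pvDC items lo ((lo + hi) / 2)).1 ++ (pvDC items ((lo + hi) / 2) hi).1,
     (pvDC items lo ((lo + hi) / 2)).2 + (pvDC items ((lo + hi) / 2) hi).2)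
termination_by hi - lo
decreasing_by all_goals omega

def mensagemQuantoFalta_alt (quanto_falta : List (String × Int)) : String :=
  let r := pvDC quanto_falta 0 quanto_falta.length
  if r.2 ≠ 0 then
    r.1 ++ "Você já passou em " ++ PySem.Int.toStr r.2 ++ "/" ++
      PySem.Int.toStr (quanto_falta.length : Int) ++ " materias(genio, apenas.)\n"
  else r.1

-- ===== PRECONDITION & SPEC =====
def Spec_mensagemQuantoFalta (quanto_falta : List (String × Int)) (out : String) : Prop := out = mensagemQuantoFalta_alt quanto_falta
instance (quanto_falta : List (String × Int)) (out : String) : Decidable (Spec_mensagemQuantoFalta quanto_falta out) := by unfold Spec_mensagemQuantoFalta; infer_instance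

-- ===== CLAIM (what is proved, stated in full; the proofs are below) =====
def Claim_equal_mensagemQuantoFalta : Prop := ∀ (quanto_falta : List (String × Int)), Dom_mensagemQuantoFalta quanto_falta → Spec_mensagemQuantoFalta quanto_falta (mensagemQuantoFalta quanto_falta)

-- ===== LEMMAS AND PROOFS =====
-- the per-subject chunk (proof-side characterisation of both programs' output pieces)
def pvChunk (p : String × Int) : String :=
  if p.2 < 0 then p.1 ++ ":\njah passou\n\n"
  else p.1 ++ ":\nfaltam " ++ PySem.Int.toStr p.2 ++ " pontos nah media pro c passar\n\n"

theorem pv_foldl_acc (l : List String) (x : String) :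
    l.foldl (fun r s => r ++ s) x = x ++ l.foldl (fun r s => r ++ s) "" := by
  induction l generalizing x with
  | nil => simp
  | cons b t ih =>
    simp only [List.foldl_cons]
    rw [ih (x ++ b), ih ("" ++ b)]
    simp [String.append_assoc]

theorem pv_join_cons (a : String) (l : List String) :
    String.join (a :: l) = a ++ String.join l := by
  rw [String.join, String.join, List.foldl_cons, pv_foldl_acc]
  simp

theorem pv_join_append (a b : List String) :
    String.join (a ++ b) = String.join a ++ String.join b := by
  induction a with
  | nil => simp [String.join]
  | cons h t ih => rw [List.cons_append, pv_join_cons, pv_join_cons, ih, String.append_assoc]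

-- A's loop computes the joined chunks and the count of negatives
theorem pv_fold (l : List (String × Int)) (msg : String) (c : Int) :
    l.foldl (fun (st : String × Int) (p : String × Int) =>
      let m := st.1 ++ p.1 ++ ":\n"
      if p.2 < 0 then (m ++ "jah passou\n\n", st.2 + 1)
      else (m ++ "faltam " ++ PySem.Int.toStr p.2 ++ " pontos nah media pro c passar\n\n", st.2))
      (msg, c)
    = (msg ++ String.join (l.map pvChunk), c + ((l.filter (fun p => p.2 < 0)).length : Int)) := by
  induction l generalizing msg c with
  | nil => simp [String.join]
  | cons h t ih =>
    rw [List.foldl_cons]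
    dsimp only
    by_cases hh : h.2 < 0
    · rw [if_pos hh, ih]
      simp [pvChunk, pv_join_cons, hh, String.append_assoc]
      omega
    · rw [if_neg hh, ih]
      simp [pvChunk, pv_join_cons, hh, String.append_assoc]

-- B's divide and conquer computes the same pair on the segment [lo, hi)
theorem pv_dc (items : List (String × Int)) :
    ∀ n lo hi, hi - lo = n → lo ≤ hi → hi ≤ items.length →
    pvDC items lo hi =
      (String.join (((items.drop lo).take (hi - lo)).map pvChunk),
       ((((items.drop lo).take (hi - lo)).filter (fun p => p.2 < 0)).length : Int)) := by
  intro n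
  induction n using Nat.strong_induction_on with
  | _ n ih =>
    intro lo hi hn hle hlen
    rw [pvDC]
    by_cases h0 : hi - lo = 0
    · simp [h0, String.join]
    · rw [if_neg h0]
      by_cases h1 : hi - lo = 1
      · rw [if_pos h1]
        have hlt : lo < items.length := by omega
        rw [PySem.List.pyGet?_natCast]
        have hseg : (items.drop lo).take (hi - lo) = [items[lo]] := by
          rw [h1]
          rw [List.take_one, List.head?_drop]
          simp [List.getElem?_eq_getElem hlt]
        rw [List.getElem?_eq_getElem hlt]
        rw [hseg]
        by_cases hh : (items[lo]).2 < 0 <;>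
          simp [hh, pvChunk, String.join]
      · rw [if_neg h1]
        have hmid1 : lo < (lo + hi) / 2 := by omega
        have hmid2 : (lo + hi) / 2 < hi := by omega
        rw [ih ((lo + hi) / 2 - lo) (by omega) lo ((lo + hi) / 2) rfl (by omega) (by omega),
            ih (hi - (lo + hi) / 2) (by omega) ((lo + hi) / 2) hi rfl (by omega) hlen]
        have hsplit : (items.drop lo).take (hi - lo)
            = (items.drop lo).take ((lo + hi) / 2 - lo)
              ++ (items.drop ((lo + hi) / 2)).take (hi - (lo + hi) / 2) := by
          have hsum : hi - lo = ((lo + hi) / 2 - lo) + (hi - (lo + hi) / 2) := by omega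
          have hmid : lo + ((lo + hi) / 2 - lo) = (lo + hi) / 2 := by omega
          rw [hsum, List.take_add, List.drop_drop, hmid]
        rw [hsplit]
        simp [pv_join_append]

-- ===== VERDICT (by name: the statement is the Claim_ definition above) =====
theorem mensagemQuantoFalta_spec : Claim_equal_mensagemQuantoFalta := by
  intro qf _
  show mensagemQuantoFalta qf = mensagemQuantoFalta_alt qf
  simp only [mensagemQuantoFalta, mensagemQuantoFalta_alt,
    pv_fold, pv_dc qf (qf.length - 0) 0 qf.length rfl (Nat.zero_le _) le_rfl]
  rw [Nat.sub_zero, List.drop_zero, List.take_of_length_le (le_refl qf.length)]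
  simp
  rw [Int.zero_add]
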